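-- pv_equiv track=rewrite | github.com/Aasthaengg/IBMdataset | Python_codes/p03230/s437617192.py | d_crossing
-- ===== SOURCE A (Python) =====
-- def d_crossing(N):
--     """
--     S_k は、どの2つの部分集合の共通部分の要素数が1であり、1からNのどの要素も
--     ちょうど2回しか使われないため、各集合の要素数はいずれもk-1である。
--     また、要素数の和を考えると、 2N=k(k-1) ⇔ N=k(k-1)/2 である。
--
--     逆に、1からk(k-1)/2までの数を三角形に並べたあと、対称行列になるように
--     行列を構成すると、各行(列でも可)または対角成分を要素とした集合を部分集合とすれば
--     条件を満たせる。
--     (例: N=6)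
--     1         1 2 4
--     2 3   <=> 2 3 5
--     4 5 6     4 5 6
--     として、{1, 2, 4}, {2, 3, 5}, {4, 5, 6}, {1, 3, 6} を部分集合とすればよい。
--     """
--
--     # N = k(k-1)/2 となる正整数kが存在するなら、求めるものが作れる
--     k = 2
--     while True:
--         tmp = k * (k - 1)
--         if tmp > 2 * N:
--             return 'No'
--         elif tmp == 2 * N:
--             ans = ['Yes']
--             break
--         k += 1
--
--     ans.append(str(k))
--     # 1からk(k-1)/2までの数を三角形に並べ、対称行列を構成する
--     matrix = [[0] * (k - 1) for _ in range(k - 1)]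
--     cnt = 1
--     for r in range(k - 1):
--         for c in range(r + 1):
--             matrix[c][r] = matrix[r][c] = cnt
--             cnt += 1
--     # 各行を取り出したものを部分集合とする
--     for r in matrix:
--         ans.append('{0} {1}'.format(k - 1, ' '.join(map(str, r))))
--     # 対角成分を取り出したものを部分集合とする
--     tmp = [matrix[j][j] for j in range(k - 1)]
--     ans.append('{0} {1}'.format(k - 1, ' '.join(map(str, tmp))))
--     # 出力形式に沿って出力
--     ans = '\n'.join(ans)
--     return ans
-- ===== SOURCE B (Python) =====
-- def d_crossing(N):
--     # Closed-ish detection of k (binary search instead of a linear scan),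
--     # and each subset value computed directly by the symmetric formula
--     # f(r,c) = T(max(r,c)) + min(r,c) + 1 instead of building a matrix.
--     if N < 1:
--         return 'No'
--     # largest k in [1, N+2) with k*(k-1) <= 2*N
--     lo, hi = 1, N + 2
--     while hi - lo > 1:
--         mid = (lo + hi) // 2
--         if mid * (mid - 1) <= 2 * N:
--             lo = mid
--         else:
--             hi = mid
--     k = lo
--     if k * (k - 1) != 2 * N:
--         return 'No'
--
--     def f(r, c):
--         hi2, lo2 = (r, c) if r >= c else (c, r)
--         return hi2 * (hi2 + 1) // 2 + lo2 + 1
--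
--     lines = ['Yes', str(k)]
--     for r in range(k - 1):
--         lines.append(str(k - 1) + ' ' + ' '.join(str(f(r, c)) for c in range(k - 1)))
--     lines.append(str(k - 1) + ' ' + ' '.join(str(f(j, j)) for j in range(k - 1)))
--     return '\n'.join(lines)
-- ===== Notes on version B (the rewrite author's own statement) =====
-- stated objective: alternative
-- what changed: A finds k by a linear scan from 2 and fills a symmetric (k-1)x(k-1) matrix by double in-place assignment before reading its rows and diagonal; B finds k by binary search on k(k-1)<=2N and emits each subset value directly with the closed symmetric formula f(r,c)=max(r,c)*(max(r,c)+1)//2+min(r,c)+1, building no matrix.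
import Mathlib
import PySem

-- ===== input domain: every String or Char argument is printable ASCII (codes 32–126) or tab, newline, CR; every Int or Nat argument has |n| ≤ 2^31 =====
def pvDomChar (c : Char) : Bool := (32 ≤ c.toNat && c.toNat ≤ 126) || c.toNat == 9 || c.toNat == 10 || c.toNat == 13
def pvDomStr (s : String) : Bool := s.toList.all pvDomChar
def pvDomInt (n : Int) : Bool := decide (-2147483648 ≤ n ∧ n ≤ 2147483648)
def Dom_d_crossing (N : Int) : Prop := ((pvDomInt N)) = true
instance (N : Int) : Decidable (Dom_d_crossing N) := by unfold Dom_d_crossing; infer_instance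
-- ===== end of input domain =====

-- B replaces A's linear scan for k by a binary search and the matrix construction by a
-- direct symmetric index formula; objective: alternative (no measured speed claim).

-- ===== PORT A =====

-- A's 'while True' loop: k = j + 2, returns the k with k*(k-1) == 2*N, or none for 'No'
def d_crossing_loopA (N : Int) (j : Nat) : Option Nat :=
  if ((j : Int) + 2) * (((j : Int) + 2) - 1) > 2 * N then none
  else if ((j : Int) + 2) * (((j : Int) + 2) - 1) = 2 * N then some (j + 2)
  else d_crossing_loopA N (j + 1)
termination_by (2 * N + 1 - ((j : Int) + 2) * ((j : Int) + 1)).toNat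
decreasing_by
  rename_i h1 h2
  push_cast
  have e1 : ((j : Int) + 1 + 2) * ((j : Int) + 1 + 1)
      = ((j : Int) + 2) * ((j : Int) + 1) + 2 * ((j : Int) + 2) := by ring
  have e2 : ((j : Int) + 2) * (((j : Int) + 2) - 1) = ((j : Int) + 2) * ((j : Int) + 1) := by ring
  rw [e2] at h1 h2
  omega

-- Python 'matrix[c][r] = matrix[r][c] = v' (single in-place double assignment)
def pySet2 (m : List (List Int)) (i j : Nat) (v : Int) : List (List Int) :=
  m.set i ((m.getD i []).set j v)

-- the two nested 'for' loops filling the matrix, threading (matrix, cnt)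
def d_crossing_build (n : Nat) : List (List Int) × Int :=
  (List.range n).foldl
    (fun st r => (List.range (r + 1)).foldl
      (fun st c => (pySet2 (pySet2 st.1 c r st.2) r c st.2, st.2 + 1)) st)
    (List.replicate n (List.replicate n 0), 1)

def d_crossing (N : Int) : String :=
  match d_crossing_loopA N 0 with
  | none => "No"
  | some kn =>
    let k : Int := (kn : Int)
    let m := (d_crossing_build (kn - 1)).1
    let ans : List String :=
      ["Yes", PySem.Int.toStr k]
      ++ m.map (fun row =>
           PySem.Int.toStr (k - 1) ++ " " ++ PySem.Str.join " " (row.map PySem.Int.toStr))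
      ++ [PySem.Int.toStr (k - 1) ++ " " ++
           PySem.Str.join " "
             (((List.range (kn - 1)).map (fun j => (m.getD j []).getD j 0)).map PySem.Int.toStr)]
    PySem.Str.join "\n" ans

-- ===== PORT B =====

-- binary search: largest k in [lo, hi) with k*(k-1) <= 2*N (invariant maintained by caller)
def d_crossing_bs (N lo hi : Int) : Int :=
  if hi - lo > 1 then
    let mid := PySem.Int.floordiv (lo + hi) 2
    if mid * (mid - 1) ≤ 2 * N then d_crossing_bs N mid hi
    else d_crossing_bs N lo mid
  else lo
termination_by (hi - lo).toNat
decreasing_by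
  all_goals
    rename_i h _
    rw [PySem.Int.floordiv_eq_ediv_of_pos (by norm_num)]
    omega

-- f(r, c) = T(max(r,c)) + min(r,c) + 1
def d_crossing_f (r c : Int) : Int :=
  let p := if r ≥ c then (r, c) else (c, r)
  PySem.Int.floordiv (p.1 * (p.1 + 1)) 2 + p.2 + 1

def d_crossing_alt (N : Int) : String :=
  if N < 1 then "No"
  else
    let k := d_crossing_bs N 1 (N + 2)
    if k * (k - 1) ≠ 2 * N then "No"
    else
      PySem.Str.join "\n"
        (["Yes", PySem.Int.toStr k]
         ++ (PySem.List.pyRange 0 (k - 1) 1).map (fun r =>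
              PySem.Int.toStr (k - 1) ++ " " ++
                PySem.Str.join " "
                  ((PySem.List.pyRange 0 (k - 1) 1).map (fun c => PySem.Int.toStr (d_crossing_f r c))))
         ++ [PySem.Int.toStr (k - 1) ++ " " ++
              PySem.Str.join " "
                ((PySem.List.pyRange 0 (k - 1) 1).map (fun j => PySem.Int.toStr (d_crossing_f j j)))])

-- ===== PRECONDITION & SPEC =====
def Spec_d_crossing (N : Int) (out : String) : Prop := out = d_crossing_alt N
instance (N : Int) (out : String) : Decidable (Spec_d_crossing N out) := by unfold Spec_d_crossing; infer_instance

-- ===== CLAIM (what is proved, stated in full; the proofs are below) =====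
def Claim_equal_d_crossing : Prop := ∀ (N : Int), Dom_d_crossing N → Spec_d_crossing N (d_crossing N)

-- ===== LEMMAS AND PROOFS =====

theorem d_mono (a b : Int) (h1 : 1 ≤ a) (h2 : a ≤ b) : a * (a - 1) ≤ b * (b - 1) := by nlinarith

theorem d_loopA_some (N : Int) (j k : Nat) (h : d_crossing_loopA N j = some k) :
    (k : Int) * ((k : Int) - 1) = 2 * N ∧ j + 2 ≤ k := by
  fun_induction d_crossing_loopA N j with
  | case1 j h1 => simp at h
  | case2 j h1 h2 =>
      obtain rfl : j + 2 = k := by simpa using h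
      constructor
      · push_cast; linarith [h2]
      · omega
  | case3 j h1 h2 ih =>
      obtain ⟨e, hk⟩ := ih h
      exact ⟨e, by omega⟩

theorem d_loopA_none (N : Int) (j : Nat) (h : d_crossing_loopA N j = none) :
    ∀ k : Nat, j + 2 ≤ k → (k : Int) * ((k : Int) - 1) ≠ 2 * N := by
  fun_induction d_crossing_loopA N j with
  | case1 j h1 =>
      intro k hk heq
      have hm : ((j : Int) + 2) * (((j : Int) + 2) - 1) ≤ (k : Int) * ((k : Int) - 1) := by
        apply d_mono <;> omega
      omega
  | case2 j h1 h2 => simp at h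
  | case3 j h1 h2 ih =>
      intro k hk heq
      rcases Nat.eq_or_lt_of_le hk with he | hlt
      · apply h2; rw [← heq, ← he]; push_cast; ring
      · exact ih h k (by omega) heq

theorem d_bs_spec (N : Int) : ∀ (fuel : Nat) (lo hi : Int), (hi - lo).toNat ≤ fuel →
    1 ≤ lo → lo < hi → lo * (lo - 1) ≤ 2 * N → 2 * N < hi * (hi - 1) →
    1 ≤ d_crossing_bs N lo hi ∧ d_crossing_bs N lo hi * (d_crossing_bs N lo hi - 1) ≤ 2 * N ∧
      2 * N < (d_crossing_bs N lo hi + 1) * d_crossing_bs N lo hi := by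
  intro fuel
  induction fuel with
  | zero => intro lo hi hf h1 h2 h3 h4; omega
  | succ f ih =>
      intro lo hi hf h1 h2 h3 h4
      rw [d_crossing_bs]
      by_cases hgap : hi - lo > 1
      · rw [if_pos hgap]
        have hmid : PySem.Int.floordiv (lo + hi) 2 = (lo + hi) / 2 :=
          PySem.Int.floordiv_eq_ediv_of_pos (by norm_num)
        simp only [hmid]
        by_cases hle : (lo + hi) / 2 * ((lo + hi) / 2 - 1) ≤ 2 * N
        · rw [if_pos hle]
          exact ih _ hi (by omega) (by omega) (by omega) hle h4
        · rw [if_neg hle]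
          refine ih lo _ (by omega) h1 (by omega) h3 (by omega)
      · rw [if_neg hgap]
        have hhi : hi = lo + 1 := by omega
        subst hhi
        refine ⟨h1, h3, ?_⟩
        have : (lo + 1) * (lo + 1 - 1) = (lo + 1) * lo := by ring
        calc 2 * N < (lo + 1) * (lo + 1 - 1) := h4
          _ = (lo + 1) * lo := by ring

def dT (r : Nat) : Nat := r * (r + 1) / 2

def dF (i j : Nat) : Int := ((dT (max i j) + min i j + 1 : Nat) : Int)

def dGrid (n : Nat) (g : Nat → Nat → Int) : List (List Int) :=
  (List.range n).map (fun i => (List.range n).map (fun j => g i j))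

theorem dGrid_congr (n : Nat) (g g' : Nat → Nat → Int)
    (h : ∀ a < n, ∀ b < n, g a b = g' a b) : dGrid n g = dGrid n g' := by
  unfold dGrid
  apply List.map_congr_left
  intro a ha
  rw [List.mem_range] at ha
  apply List.map_congr_left
  intro b hb
  rw [List.mem_range] at hb
  exact h a ha b hb

theorem dGrid_replicate (n : Nat) :
    List.replicate n (List.replicate n (0 : Int)) = dGrid n (fun _ _ => 0) := by
  unfold dGrid
  apply List.ext_getElem
  · simp
  · intro i h1 h2
    simp

theorem pySet2_dGrid (n : Nat) (g : Nat → Nat → Int) (i j : Nat) (hi : i < n) (_hj : j < n)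
    (v : Int) :
    pySet2 (dGrid n g) i j v = dGrid n (fun a b => if a = i ∧ b = j then v else g a b) := by
  unfold pySet2 dGrid
  have hget : ((List.range n).map (fun a => (List.range n).map (fun b => g a b))).getD i []
      = (List.range n).map (fun b => g i b) := by
    rw [List.getD_eq_getElem _ _ (by simpa using hi)]
    simp
  rw [hget]
  apply List.ext_getElem
  · simp
  · intro a h1 h2
    simp only [List.length_set, List.length_map, List.length_range] at h1
    rw [List.getElem_set]
    by_cases hai : i = a
    · subst hai
      simp only [List.getElem_map, List.getElem_range, if_true, true_and]
      apply List.ext_getElem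
      · simp
      · intro b hb1 hb2
        rw [List.getElem_set]
        simp only [List.getElem_map, List.getElem_range]
        by_cases hbj : j = b
        · subst hbj; simp
        · simp [hbj, Ne.symm hbj]
    · simp only [if_neg hai, List.getElem_map, List.getElem_range]
      apply List.map_congr_left
      intro b hb
      have : ¬ (a = i ∧ b = j) := by tauto
      simp [this]

theorem dT_succ (r : Nat) : dT (r + 1) = dT r + (r + 1) := by
  unfold dT
  have he : r * (r + 1) % 2 = 0 := Nat.even_iff.mp (Nat.even_mul_succ_self r)
  have e : (r + 1) * (r + 1 + 1) = r * (r + 1) + 2 * (r + 1) := by ring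
  omega

theorem d_inner (n r : Nat) (hr : r < n) : ∀ c, c ≤ r + 1 →
    (List.range c).foldl
      (fun st x => (pySet2 (pySet2 st.1 x r st.2) r x st.2, st.2 + 1))
      (dGrid n (fun a b => if max a b < r then dF a b else 0), (dT r : Int) + 1)
    = (dGrid n (fun a b => if max a b < r ∨ (max a b = r ∧ min a b < c) then dF a b else 0),
       (dT r : Int) + 1 + c) := by
  intro c
  induction c with
  | zero =>
      intro _
      simp only [List.range_zero, List.foldl_nil, Prod.mk.injEq]
      constructor
      · apply dGrid_congr; intro a _ b _; simp
      · simp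
  | succ c ih =>
      intro hc
      rw [List.range_succ, List.foldl_append, ih (by omega), List.foldl_cons, List.foldl_nil]
      have hcr : c ≤ r := by omega
      have hcn : c < n := by omega
      simp only
      rw [pySet2_dGrid n _ c r hcn hr, pySet2_dGrid n _ r c hr hcn]
      simp only [Prod.mk.injEq]
      constructor
      · apply dGrid_congr
        intro a ha b hb
        by_cases h1 : a = r ∧ b = c
        · rw [if_pos h1, if_pos (by omega : max a b < r ∨ (max a b = r ∧ min a b < c + 1))]
          unfold dF
          have hm1 : max a b = r := by omega
          have hm2 : min a b = c := by omega
          rw [hm1, hm2]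
          push_cast
          ring
        · rw [if_neg h1]
          by_cases h2 : a = c ∧ b = r
          · rw [if_pos h2, if_pos (by omega : max a b < r ∨ (max a b = r ∧ min a b < c + 1))]
            unfold dF
            have hm1 : max a b = r := by omega
            have hm2 : min a b = c := by omega
            rw [hm1, hm2]
            push_cast
            ring
          · rw [if_neg h2]
            have hiff : (max a b < r ∨ (max a b = r ∧ min a b < c)) ↔
                (max a b < r ∨ (max a b = r ∧ min a b < c + 1)) := by
              constructor
              · intro h; omega
              · intro h
                rcases h with h | ⟨hmx, hmn⟩
                · exact Or.inl h
                · right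
                  refine ⟨hmx, ?_⟩
                  rcases Nat.lt_succ_iff_lt_or_eq.mp hmn with h' | h'
                  · exact h'
                  · exfalso
                    -- min a b = c and max a b = r forces (a,b) = (r,c) or (c,r)
                    rcases Nat.le_total a b with hab | hab
                    · have : a = c ∧ b = r := by omega
                      exact h2 this
                    · have : a = r ∧ b = c := by omega
                      exact h1 this
            by_cases h3 : max a b < r ∨ (max a b = r ∧ min a b < c)
            · rw [if_pos h3, if_pos (hiff.mp h3)]
            · rw [if_neg h3, if_neg (fun h => h3 (hiff.mpr h))]
      · push_cast; ring

theorem d_outer (n : Nat) : ∀ r, r ≤ n →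
    (List.range r).foldl
      (fun st r => (List.range (r + 1)).foldl
        (fun st c => (pySet2 (pySet2 st.1 c r st.2) r c st.2, st.2 + 1)) st)
      (List.replicate n (List.replicate n 0), 1)
    = (dGrid n (fun a b => if max a b < r then dF a b else 0), (dT r : Int) + 1) := by
  intro r
  induction r with
  | zero =>
      intro _
      simp only [List.range_zero, List.foldl_nil, Prod.mk.injEq]
      refine ⟨?_, by simp [dT]⟩
      rw [dGrid_replicate]
      apply dGrid_congr
      intro a _ b _
      simp
  | succ r ih =>
      intro hrn
      rw [List.range_succ, List.foldl_append, ih (by omega), List.foldl_cons, List.foldl_nil,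
        d_inner n r (by omega) (r + 1) (by omega)]
      simp only [Prod.mk.injEq]
      constructor
      · apply dGrid_congr
        intro a ha b hb
        have : (max a b < r ∨ (max a b = r ∧ min a b < r + 1)) ↔ max a b < r + 1 := by omega
        by_cases h : max a b < r + 1
        · rw [if_pos (this.mpr h), if_pos h]
        · rw [if_neg (fun hh => h (this.mp hh)), if_neg h]
      · rw [dT_succ]
        push_cast
        ring

theorem d_build_fst (n : Nat) :
    (d_crossing_build n).1 = dGrid n (fun a b => if max a b < n then dF a b else 0) := by
  unfold d_crossing_build
  rw [d_outer n n (le_refl n)]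

theorem dF_eq (i j : Nat) : d_crossing_f (i : Int) (j : Int) = dF i j := by
  unfold d_crossing_f dF dT
  by_cases h : j ≤ i
  · have h' : ((i : Int) ≥ (j : Int)) := by exact_mod_cast h
    rw [if_pos h', Nat.max_eq_left h, Nat.min_eq_right h]
    simp only
    rw [PySem.Int.floordiv_eq_ediv_of_pos (by norm_num)]
    have e : ((i * (i + 1) / 2 : Nat) : Int) = ((i * (i + 1) : Nat) : Int) / 2 :=
      Int.natCast_div _ 2
    push_cast [e]
    ring
  · have h' : ¬ ((i : Int) ≥ (j : Int)) := by exact_mod_cast h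
    rw [if_neg h', Nat.max_eq_right (by omega), Nat.min_eq_left (by omega)]
    simp only
    rw [PySem.Int.floordiv_eq_ediv_of_pos (by norm_num)]
    have e : ((j * (j + 1) / 2 : Nat) : Int) = ((j * (j + 1) : Nat) : Int) / 2 :=
      Int.natCast_div _ 2
    push_cast [e]
    ring

theorem d_main (N : Int) : d_crossing N = d_crossing_alt N := by
  cases hA : d_crossing_loopA N 0 with
  | none =>
      simp only [d_crossing.eq_def, hA]
      unfold d_crossing_alt
      by_cases hN : N < 1
      · rw [if_pos hN]
      · rw [if_neg hN]
        have hb := d_bs_spec N (N + 1).toNat 1 (N + 2) (by omega) (by omega) (by omega)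
          (by norm_num; omega) (by nlinarith)
        obtain ⟨h1, h2, h3⟩ := hb
        rw [if_pos ?_]
        intro heq
        set r := d_crossing_bs N 1 (N + 2) with hrdef
        have hk2 : 2 ≤ r := by
          rcases (by omega : r = 1 ∨ 2 ≤ r) with h | h
          · rw [h] at heq; norm_num at heq; omega
          · exact h
        refine d_loopA_none N 0 hA r.toNat (by omega) ?_
        have hc : ((r.toNat : Nat) : Int) = r := Int.toNat_of_nonneg (by omega)
        rw [hc]
        exact heq
  | some kn =>
      obtain ⟨he, hk2⟩ := d_loopA_some N 0 kn hA
      have hkc : (2 : Int) ≤ (kn : Int) := by exact_mod_cast hk2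
      have hN1 : 1 ≤ N := by nlinarith
      simp only [d_crossing.eq_def, hA]
      unfold d_crossing_alt
      rw [if_neg (by omega)]
      have hb := d_bs_spec N (N + 1).toNat 1 (N + 2) (by omega) (by omega) (by omega)
        (by norm_num; omega) (by nlinarith)
      obtain ⟨h1, h2, h3⟩ := hb
      set r := d_crossing_bs N 1 (N + 2) with hrdef
      have hr : r = (kn : Int) := by
        by_contra hne
        rcases lt_or_gt_of_ne hne with hlt | hgt
        · have : (r + 1) * (r + 1 - 1) ≤ (kn : Int) * ((kn : Int) - 1) :=
            d_mono (r + 1) (kn : Int) (by omega) (by omega)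
          nlinarith
        · have : ((kn : Int) + 1) * ((kn : Int) + 1 - 1) ≤ r * (r - 1) :=
            d_mono ((kn : Int) + 1) r (by omega) (by omega)
          nlinarith
      rw [hr, if_neg (fun h => h he)]
      -- both sides: join "\n" of equal string lists
      set n : Nat := kn - 1 with hndef
      have hcast : (kn : Int) - 1 = (n : Int) := by omega
      have hm : (d_crossing_build (kn - 1)).1 = dGrid n dF := by
        rw [d_build_fst]
        apply dGrid_congr
        intro a ha b hb'
        rw [if_pos (by omega)]
      rw [hm, hcast, PySem.List.pyRange_zero_nat n]
      congr 1
      congr 2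
      · -- the rows
        unfold dGrid
        rw [List.map_map, List.map_map]
        apply List.map_congr_left
        intro i _
        simp only [Function.comp]
        refine congrArg (fun t => PySem.Int.toStr (n : Int) ++ " " ++ PySem.Str.join " " t) ?_
        rw [List.map_map, List.map_map]
        apply List.map_congr_left
        intro j _
        simp only [Function.comp, dF_eq]
      · -- the diagonal
        congr 2
        rw [List.map_map, List.map_map]
        apply List.map_congr_left
        intro j hj
        rw [List.mem_range] at hj
        simp only [Function.comp]
        have hlen : j < (dGrid n dF).length := by simp [dGrid, hj]
        rw [List.getD_eq_getElem _ _ hlen]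
        simp only [dGrid, List.getElem_map, List.getElem_range]
        rw [List.getD_eq_getElem _ _ (by simp [hj]), List.getElem_map, List.getElem_range]
        rw [dF_eq]

-- ===== VERDICT (by name: the statement is the Claim_ definition above) =====
theorem d_crossing_spec : Claim_equal_d_crossing := by
  intro N _
  unfold Spec_d_crossing
  exact d_main N
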